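-- pv_equiv track=rewrite | github.com/Slothfulwave612/Football-Analytics-With-Python | 08. Latest Work & Codes/06_old_codes/src/my_utils.py | key_assist
-- ===== SOURCE A (Python) =====
-- def key_assist(qualifier):
--     """
--     Function to find key-pass and assists.
--
--     Args:
--         qualifier (list): containing pass info
--
--     Returns:
--         str: type of pass.
--     """
--     key_pass = 0
--
--     for i in qualifier:
--         if i["type"]["displayName"] == "IntentionalGoalAssist":
--             return "Assist"
--         elif i["type"]["displayName"] == "ShotAssist":
--             key_pass = 1
--
--     if key_pass == 1:
--         return "Key Pass"
--     elif key_pass == 0: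
--         return "Simple Pass"
-- ===== SOURCE B (Python) =====
-- def key_assist(qualifier):
--     if any(q["type"]["displayName"] == "IntentionalGoalAssist" for q in qualifier):
--         return "Assist"
--     if any(q["type"]["displayName"] == "ShotAssist" for q in qualifier):
--         return "Key Pass"
--     return "Simple Pass"
-- ===== Notes on version B (the rewrite author's own statement) =====
-- stated objective: idiomatic
-- what changed: Replaces the single loop with a mutable key_pass flag by two independent short-circuiting any() membership scans (Assist scan, then ShotAssist scan).
import Mathlib
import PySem

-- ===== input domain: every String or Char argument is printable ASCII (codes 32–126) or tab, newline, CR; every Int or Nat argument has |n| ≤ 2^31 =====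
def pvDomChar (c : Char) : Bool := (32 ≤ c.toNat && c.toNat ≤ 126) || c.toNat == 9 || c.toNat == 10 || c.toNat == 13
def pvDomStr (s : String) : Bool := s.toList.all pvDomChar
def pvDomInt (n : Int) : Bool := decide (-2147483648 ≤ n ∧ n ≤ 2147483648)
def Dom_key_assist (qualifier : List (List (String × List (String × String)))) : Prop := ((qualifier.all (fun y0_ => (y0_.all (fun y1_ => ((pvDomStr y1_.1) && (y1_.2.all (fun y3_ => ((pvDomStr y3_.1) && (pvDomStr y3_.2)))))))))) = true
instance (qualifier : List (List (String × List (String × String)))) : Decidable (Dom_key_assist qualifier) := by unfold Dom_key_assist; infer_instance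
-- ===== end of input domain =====

-- B replaces A's single loop with a key_pass flag by two independent short-circuiting any() scans (idiomatic decomposition, same cost).


-- ===== PORT A =====
-- i["type"]["displayName"]; inside Pre_ both lookups succeed, so getD stands in for the raising lookup (raising inputs are excluded by Pre_).
def pvName (i : List (String × List (String × String))) : String :=
  PySem.Dict.getD (PySem.Dict.mk (PySem.Dict.getD (PySem.Dict.mk i) "type" [])) "displayName" ""

-- the for-loop with the key_pass accumulator, then the final if/elif (key_pass is always 0 or 1, so the elif is the else branch)
def keyAuxA (qualifier : List (List (String × List (String × String)))) (key_pass : Int) : String :=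
  match qualifier with
  | [] => if key_pass = 1 then "Key Pass" else "Simple Pass"
  | i :: rest =>
      if pvName i = "IntentionalGoalAssist" then "Assist"
      else if pvName i = "ShotAssist" then keyAuxA rest 1
      else keyAuxA rest key_pass

def key_assist (qualifier : List (List (String × List (String × String)))) : String :=
  keyAuxA qualifier 0

-- ===== PORT B =====
def key_assist_alt (qualifier : List (List (String × List (String × String)))) : String :=
  if qualifier.any (fun q => pvName q = "IntentionalGoalAssist") then "Assist"
  else if qualifier.any (fun q => pvName q = "ShotAssist") then "Key Pass"
  else "Simple Pass"

-- ===== PRECONDITION & SPEC =====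
-- an element is well-formed iff both dict lookups of A succeed (no KeyError)
def pvWfB (i : List (String × List (String × String))) : Bool :=
  (((PySem.Dict.get? (PySem.Dict.mk i) "type").bind
      (fun d => PySem.Dict.get? (PySem.Dict.mk d) "displayName")).isSome)

-- Pre_: every element scanned before the first "IntentionalGoalAssist" is well-formed — exactly the inputs where Python A returns (it raises KeyError otherwise)
def Pre_key_assist (qualifier : List (List (String × List (String × String)))) : Prop :=
  ∀ i ∈ qualifier.takeWhile (fun q => pvName q ≠ "IntentionalGoalAssist"), pvWfB i = true

instance (qualifier : List (List (String × List (String × String)))) : Decidable (Pre_key_assist qualifier) := by unfold Pre_key_assist; infer_instance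

def pvWitness_key_assist : (List (List (String × List (String × String)))) :=
  [[("type", [("displayName", "ShotAssist")])], [("type", [("displayName", "Pass")])]]

def Spec_key_assist (qualifier : List (List (String × List (String × String)))) (out : String) : Prop := out = key_assist_alt qualifier
instance (qualifier : List (List (String × List (String × String)))) (out : String) : Decidable (Spec_key_assist qualifier out) := by unfold Spec_key_assist; infer_instance

-- ===== CLAIM (what is proved, stated in full; the proofs are below) =====
def Claim_equal_key_assist : Prop := ∀ (qualifier : List (List (String × List (String × String)))), Dom_key_assist qualifier → Pre_key_assist qualifier → Spec_key_assist qualifier (key_assist qualifier)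

-- ===== LEMMAS AND PROOFS =====

-- loop invariant: A's loop with accumulator kp equals B's two-scan form seeded with kp
theorem keyAuxA_eq (qualifier : List (List (String × List (String × String)))) (kp : Int) :
    keyAuxA qualifier kp =
      (if qualifier.any (fun q => pvName q = "IntentionalGoalAssist") then "Assist"
       else if kp = 1 ∨ qualifier.any (fun q => pvName q = "ShotAssist") then "Key Pass"
       else "Simple Pass") := by
  induction qualifier generalizing kp with
  | nil => simp [keyAuxA]
  | cons i rest ih =>
      by_cases h1 : pvName i = "IntentionalGoalAssist"
      · simp [keyAuxA, h1]
      · by_cases h2 : pvName i = "ShotAssist"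
        · simp [keyAuxA, h2, ih]
        · simp [keyAuxA, h1, h2, ih]

-- ===== VERDICT (by name: the statement is the Claim_ definition above) =====
theorem key_assist_spec : Claim_equal_key_assist := by
  intro qualifier _ _
  unfold Spec_key_assist key_assist key_assist_alt
  rw [keyAuxA_eq]
  simp
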